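-- pv_equiv track=rewrite | github.com/santaro026/py_05_physics_simulation | lab/santamods/mytools.py | extract_runs
-- ===== SOURCE A (Python) =====
-- def extract_runs(mask):
--     runs = []
--     start = None
--     for i, val in enumerate(mask):
--         if val and start is None:
--             start = i
--         elif not val and start is not None:
--             runs.append((start, i))
--             start = None
--     if start is not None:
--         runs.append((start, len(mask)))
--     if len(runs) == 0:
--         runs = None
--     return runs
-- ===== SOURCE B (Python) =====
-- def extract_runs(mask):
--     runs = []
--     n = len(mask)
--     i = 0
--     while i < n:
--         if mask[i]:
--             j = i
--             while j < n and mask[j]: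
--                 j += 1
--             runs.append((i, j))
--             i = j
--         else:
--             i += 1
--     return runs or None
-- ===== Notes on version B (the rewrite author's own statement) =====
-- stated objective: alternative
-- what changed: Replaced A's per-element start/None transition state machine with a two-pointer group scan: on a truthy element, an inner pointer advances to the end of the run and the whole run is emitted at once.
import Mathlib
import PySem

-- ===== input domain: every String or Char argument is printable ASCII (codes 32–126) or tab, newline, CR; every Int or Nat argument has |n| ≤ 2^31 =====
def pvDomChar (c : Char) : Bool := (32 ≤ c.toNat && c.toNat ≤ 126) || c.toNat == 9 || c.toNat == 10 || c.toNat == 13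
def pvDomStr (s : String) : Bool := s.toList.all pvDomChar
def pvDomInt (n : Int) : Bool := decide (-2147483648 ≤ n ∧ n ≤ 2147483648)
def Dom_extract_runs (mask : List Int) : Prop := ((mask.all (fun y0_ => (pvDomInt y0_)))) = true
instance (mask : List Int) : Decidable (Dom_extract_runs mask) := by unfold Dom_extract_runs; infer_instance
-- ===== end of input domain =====

-- B replaces A's per-element start/None transition state machine with a two-pointer group
-- scan that emits each truthy run in one step (objective: alternative decomposition).

-- ===== PORT A =====
-- A's for-loop over enumerate(mask) with state (runs, start); i is the running index.
def extractRunsLoop : List Int → Int → List (Int × Int) → Option Int → List (Int × Int) × Option Int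
  | [], _, runs, start => (runs, start)
  | v :: rest, i, runs, start =>
    match start with
    | none => if v ≠ 0 then extractRunsLoop rest (i + 1) runs (some i)
              else extractRunsLoop rest (i + 1) runs none
    | some s => if v = 0 then extractRunsLoop rest (i + 1) (runs ++ [(s, i)]) none
                else extractRunsLoop rest (i + 1) runs (some s)

def extract_runs (mask : List Int) : Option (List (Int × Int)) :=
  match extractRunsLoop mask 0 [] none with
  | (runs, start) =>
    let runs := match start with
      | some s => runs ++ [(s, (mask.length : Int))]
      | none => runs
    if runs.length = 0 then none else some runs

-- ===== PORT B =====
-- B's outer while-loop: skip a falsy element, or emit the whole truthy run found by the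
-- inner while-loop (takeWhile/dropWhile mirror the inner pointer j).
def extractRunsScan : List Int → Int → List (Int × Int)
  | [], _ => []
  | v :: rest, i =>
    if v ≠ 0 then
      let j := i + 1 + ((rest.takeWhile (fun x => x != 0)).length : Int)
      (i, j) :: extractRunsScan (rest.dropWhile (fun x => x != 0)) j
    else
      extractRunsScan rest (i + 1)
termination_by mask _ => mask.length
decreasing_by
  · exact Nat.lt_succ_of_le (List.length_dropWhile_le _ _)
  · simp

def extract_runs_alt (mask : List Int) : Option (List (Int × Int)) :=
  let runs := extractRunsScan mask 0
  if runs.isEmpty then none else some runs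

-- ===== PRECONDITION & SPEC =====
def Spec_extract_runs (mask : List Int) (out : Option (List (Int × Int))) : Prop := out = extract_runs_alt mask
instance (mask : List Int) (out : Option (List (Int × Int))) : Decidable (Spec_extract_runs mask out) := by unfold Spec_extract_runs; infer_instance

-- ===== CLAIM (what is proved, stated in full; the proofs are below) =====
def Claim_equal_extract_runs : Prop := ∀ (mask : List Int), Dom_extract_runs mask → Spec_extract_runs mask (extract_runs mask)

-- ===== LEMMAS AND PROOFS =====

-- Post-processing of A's loop state (the final append of an open run).
def extractRunsClose (mask : List Int) (i : Int) : List (Int × Int) × Option Int → List (Int × Int)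
  | (runs, some s) => runs ++ [(s, i + (mask.length : Int))]
  | (runs, none) => runs

theorem extractRunsClose_cons (v : Int) (rest : List Int) (i : Int) (p : List (Int × Int) × Option Int) :
    extractRunsClose (v :: rest) i p = extractRunsClose rest (i + 1) p := by
  rcases p with ⟨r, s⟩
  cases s
  · simp [extractRunsClose]
  · simp [extractRunsClose]
    ring

theorem extractRunsLoop_inv (mask : List Int) : ∀ (i : Int) (runs : List (Int × Int)),
    (extractRunsClose mask i (extractRunsLoop mask i runs none)
        = runs ++ extractRunsScan mask i)
    ∧ ∀ (st : Int),
      extractRunsClose mask i (extractRunsLoop mask i runs (some st))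
        = runs ++ (st, i + ((mask.takeWhile (fun x => x != 0)).length : Int))
            :: extractRunsScan (mask.dropWhile (fun x => x != 0))
                 (i + ((mask.takeWhile (fun x => x != 0)).length : Int)) := by
  induction mask with
  | nil =>
    intro i runs
    refine ⟨by simp [extractRunsLoop, extractRunsScan, extractRunsClose], fun st => ?_⟩
    simp [extractRunsLoop, extractRunsScan, extractRunsClose]
  | cons v rest ih =>
    intro i runs
    by_cases hv : v = 0
    · subst hv
      refine ⟨?_, fun st => ?_⟩
      · have h := (ih (i + 1) runs).1
        simp only [extractRunsLoop, extractRunsClose_cons]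
        norm_num
        rw [h]
        simp [extractRunsScan]
      · have h := (ih (i + 1) (runs ++ [(st, i)])).1
        simp only [extractRunsLoop, extractRunsClose_cons]
        norm_num
        rw [h]
        simp [extractRunsScan]
    · refine ⟨?_, fun st => ?_⟩
      · have h := (ih (i + 1) runs).2 i
        rw [extractRunsClose_cons]
        simp only [extractRunsLoop]
        rw [if_pos hv, h]
        simp only [extractRunsScan]
        rw [if_pos hv]
      · have h := (ih (i + 1) runs).2 st
        rw [extractRunsClose_cons]
        simp only [extractRunsLoop]
        rw [if_neg hv, h,
            List.takeWhile_cons, if_pos (by simpa using hv),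
            List.dropWhile_cons, if_pos (by simpa using hv)]
        have : i + (((rest.takeWhile (fun x => x != 0)).length + 1 : Nat) : Int)
            = i + 1 + ((rest.takeWhile (fun x => x != 0)).length : Int) := by push_cast; ring
        simp only [List.length_cons, this]

-- ===== VERDICT (by name: the statement is the Claim_ definition above) =====
theorem extract_runs_spec : Claim_equal_extract_runs := by
  intro mask _
  unfold Spec_extract_runs extract_runs extract_runs_alt
  have h := (extractRunsLoop_inv mask 0 []).1
  rcases hL : extractRunsLoop mask 0 [] none with ⟨runs, start⟩
  rw [hL] at h
  cases start with
  | none =>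
    simp [extractRunsClose] at h
    simp [h, List.isEmpty_iff, List.length_eq_zero_iff]
  | some s =>
    simp only [extractRunsClose, zero_add, List.nil_append] at h
    simp [h, List.isEmpty_iff, List.length_eq_zero_iff]
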